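-- pv_equiv track=rewrite | github.com/ashish6318/b1 | main.py | generate_faceted_questions
-- ===== SOURCE A (Python) =====
-- from typing import Dict, List, Tuple, Any, Optional, Set
--
-- def generate_faceted_questions(jtbd_text: str) -> List[str]:
--     """Generate multiple specific questions from JTBD for iterative QA"""
--     questions = []
--
--     # Universal question patterns that work across all domains
--     if any(word in jtbd_text.lower() for word in ['review', 'literature', 'survey']):
--         questions.extend([
--             "What are the main topics covered?",
--             "What methodologies are discussed?",
--             "What are the key findings or results?",
--             "What conclusions are presented?"
--         ])
--     elif any(word in jtbd_text.lower() for word in ['analyze', 'analysis', 'examine']):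
--         questions.extend([
--             "What are the main trends?",
--             "What are the key metrics?",
--             "What factors influence performance?",
--             "What are the conclusions?"
--         ])
--     elif any(word in jtbd_text.lower() for word in ['compare', 'comparison', 'contrast']):
--         questions.extend([
--             "What are the main differences?",
--             "What are the similarities?",
--             "What are the advantages and disadvantages?",
--             "What are the key characteristics?"
--         ])
--     elif any(word in jtbd_text.lower() for word in ['prepare', 'plan', 'create', 'develop']):
--         questions.extend([
--             "What are the essential components?",
--             "What steps are required?",
--             "What resources are needed?",
--             "What are the best practices?"
--         ])
--     elif any(word in jtbd_text.lower() for word in ['study', 'learn', 'understand']):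
--         questions.extend([
--             "What are the key concepts?",
--             "What are the main principles?",
--             "What are the important details?",
--             "What should be remembered?"
--         ])
--
--     # Always add generic questions if no specific ones match
--     if not questions:
--         questions = [
--             "What are the main topics?",
--             "What are the key points?",
--             "What information is provided?",
--             "What are the important details?"
--         ]
--
--     return questions[:4]  # Limit to top 4 questions
-- ===== SOURCE B (Python) =====
-- # Flat keyword->category map + min over all matched indices (no ordered cascade).
-- _KEYWORD_CATEGORY = {
--     'review': 0, 'literature': 0, 'survey': 0,
--     'analyze': 1, 'analysis': 1, 'examine': 1,
--     'compare': 2, 'comparison': 2, 'contrast': 2,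
--     'prepare': 3, 'plan': 3, 'create': 3, 'develop': 3,
--     'study': 4, 'learn': 4, 'understand': 4,
-- }
--
-- _QUESTIONS = [
--     ["What are the main topics covered?",
--      "What methodologies are discussed?",
--      "What are the key findings or results?",
--      "What conclusions are presented?"],
--     ["What are the main trends?",
--      "What are the key metrics?",
--      "What factors influence performance?",
--      "What are the conclusions?"],
--     ["What are the main differences?",
--      "What are the similarities?",
--      "What are the advantages and disadvantages?",
--      "What are the key characteristics?"],
--     ["What are the essential components?",
--      "What steps are required?",
--      "What resources are needed?",
--      "What are the best practices?"],
--     ["What are the key concepts?",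
--      "What are the main principles?",
--      "What are the important details?",
--      "What should be remembered?"],
--     ["What are the main topics?",
--      "What are the key points?",
--      "What information is provided?",
--      "What are the important details?"],
-- ]
--
-- def generate_faceted_questions(jtbd_text: str):
--     """Collect the category index of every keyword occurring in the text,
--     then pick the smallest index (= highest-priority category); 5 = generic."""
--     text = jtbd_text.lower()
--     hits = [i for k, i in _KEYWORD_CATEGORY.items() if k in text]
--     best = min(hits) if hits else 5
--     return _QUESTIONS[best]
-- ===== Notes on version B (the rewrite author's own statement) =====
-- stated objective: alternative
-- what changed: Replaces the ordered five-branch elif cascade by a flat keyword-to-category-index map: one pass collects the index of every keyword occurring in the lowercased text, the minimum index (priority) selects the question list, index 5 being the generic fallback; the text is lowercased once instead of once per branch evaluation.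
import Mathlib
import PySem

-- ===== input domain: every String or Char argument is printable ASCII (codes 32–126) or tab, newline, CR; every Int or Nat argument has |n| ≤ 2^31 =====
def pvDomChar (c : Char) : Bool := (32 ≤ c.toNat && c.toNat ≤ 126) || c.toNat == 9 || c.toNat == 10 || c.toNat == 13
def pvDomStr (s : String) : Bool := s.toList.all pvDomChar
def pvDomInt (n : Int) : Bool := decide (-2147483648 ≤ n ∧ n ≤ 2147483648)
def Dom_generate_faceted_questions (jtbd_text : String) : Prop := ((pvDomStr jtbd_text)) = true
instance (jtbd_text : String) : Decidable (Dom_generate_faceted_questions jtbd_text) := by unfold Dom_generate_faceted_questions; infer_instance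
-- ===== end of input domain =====

-- B replaces A's ordered elif cascade by a flat keyword→category-index map whose matched
-- indices are collected in one pass and resolved by taking the minimum (objective: alternative).


-- ===== PORT A =====
-- literal transliteration: questions starts empty, the if/elif chain extends it,
-- the empty-check installs the generic list, and the result is questions[:4].
def generate_faceted_questions (jtbd_text : String) : List String :=
  let questions : List String := []
  let questions :=
    if ["review", "literature", "survey"].any
        (fun w => PySem.Str.isIn w (PySem.Str.lower jtbd_text)) then
      questions ++ ["What are the main topics covered?",
                    "What methodologies are discussed?",
                    "What are the key findings or results?",
                    "What conclusions are presented?"]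
    else if ["analyze", "analysis", "examine"].any
        (fun w => PySem.Str.isIn w (PySem.Str.lower jtbd_text)) then
      questions ++ ["What are the main trends?",
                    "What are the key metrics?",
                    "What factors influence performance?",
                    "What are the conclusions?"]
    else if ["compare", "comparison", "contrast"].any
        (fun w => PySem.Str.isIn w (PySem.Str.lower jtbd_text)) then
      questions ++ ["What are the main differences?",
                    "What are the similarities?",
                    "What are the advantages and disadvantages?",
                    "What are the key characteristics?"]
    else if ["prepare", "plan", "create", "develop"].any
        (fun w => PySem.Str.isIn w (PySem.Str.lower jtbd_text)) then
      questions ++ ["What are the essential components?",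
                    "What steps are required?",
                    "What resources are needed?",
                    "What are the best practices?"]
    else if ["study", "learn", "understand"].any
        (fun w => PySem.Str.isIn w (PySem.Str.lower jtbd_text)) then
      questions ++ ["What are the key concepts?",
                    "What are the main principles?",
                    "What are the important details?",
                    "What should be remembered?"]
    else questions
  let questions :=
    if questions = [] then
      ["What are the main topics?",
       "What are the key points?",
       "What information is provided?",
       "What are the important details?"]
    else questions
  PySem.List.slice questions none (some 4)

-- ===== PORT B =====
-- Source B's _KEYWORD_CATEGORY dict as an association list in insertion order.
def pvKeywordCategory : List (String × Int) :=
  [("review", 0), ("literature", 0), ("survey", 0),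
   ("analyze", 1), ("analysis", 1), ("examine", 1),
   ("compare", 2), ("comparison", 2), ("contrast", 2),
   ("prepare", 3), ("plan", 3), ("create", 3), ("develop", 3),
   ("study", 4), ("learn", 4), ("understand", 4)]

-- Source B's _QUESTIONS table.
def pvQuestionsTable : List (List String) :=
  [["What are the main topics covered?",
    "What methodologies are discussed?",
    "What are the key findings or results?",
    "What conclusions are presented?"],
   ["What are the main trends?",
    "What are the key metrics?",
    "What factors influence performance?",
    "What are the conclusions?"],
   ["What are the main differences?",
    "What are the similarities?",
    "What are the advantages and disadvantages?",
    "What are the key characteristics?"],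
   ["What are the essential components?",
    "What steps are required?",
    "What resources are needed?",
    "What are the best practices?"],
   ["What are the key concepts?",
    "What are the main principles?",
    "What are the important details?",
    "What should be remembered?"],
   ["What are the main topics?",
    "What are the key points?",
    "What information is provided?",
    "What are the important details?"]]

def generate_faceted_questions_alt (jtbd_text : String) : List String :=
  let text := PySem.Str.lower jtbd_text
  -- comprehension [i for k, i in _KEYWORD_CATEGORY.items() if k in text]
  let hits := pvKeywordCategory.filterMap
    (fun p => if PySem.Str.isIn p.1 text then some p.2 else none)
  -- best = min(hits) if hits else 5
  let best : Int := (PySem.List.min? hits (fun i => i)).getD 5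
  -- _QUESTIONS[best]; best is always in [0,5], so the .getD [] guard never fires
  (PySem.List.pyGet? pvQuestionsTable best).getD []

-- ===== PRECONDITION & SPEC =====
def Spec_generate_faceted_questions (jtbd_text : String) (out : List String) : Prop := out = generate_faceted_questions_alt jtbd_text
instance (jtbd_text : String) (out : List String) : Decidable (Spec_generate_faceted_questions jtbd_text out) := by unfold Spec_generate_faceted_questions; infer_instance

-- ===== CLAIM (what is proved, stated in full; the proofs are below) =====
def Claim_equal_generate_faceted_questions : Prop := ∀ (jtbd_text : String), Dom_generate_faceted_questions jtbd_text → Spec_generate_faceted_questions jtbd_text (generate_faceted_questions jtbd_text)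

-- ===== LEMMAS AND PROOFS =====
-- min(hits) of a list in which j is a member and a lower bound is j itself.
theorem best_eq (hits : List Int) (j : Int) (hmem : j ∈ hits)
    (hlb : ∀ i ∈ hits, j ≤ i) :
    (PySem.List.min? hits (fun i => i)).getD 5 = j := by
  cases hh : PySem.List.min? hits (fun i => i) with
  | none =>
      rw [PySem.List.min?_eq_none_iff] at hh
      exact absurd (hh ▸ hmem) (List.not_mem_nil)
  | some m =>
      simp only [Option.getD_some]
      exact le_antisymm (PySem.List.min?_isMin hh j hmem) (hlb m (PySem.List.min?_mem hh))

set_option maxHeartbeats 800000 in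
theorem alt_g1 (t : String)
    (hg : (PySem.Str.isIn "review" (PySem.Str.lower t) ||
      (PySem.Str.isIn "literature" (PySem.Str.lower t) ||
        PySem.Str.isIn "survey" (PySem.Str.lower t))) = true) :
    generate_faceted_questions_alt t =
      ["What are the main topics covered?", "What methodologies are discussed?",
       "What are the key findings or results?", "What conclusions are presented?"] := by
  unfold generate_faceted_questions_alt
  dsimp only
  rw [best_eq _ 0 ?_ ?_]
  · simp [PySem.List.pyGet?, PySem.List.pyIdx?, pvQuestionsTable]
  · simp only [Bool.or_eq_true] at hg
    simp only [pvKeywordCategory, List.mem_filterMap]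
    rcases hg with h | h | h
    · exact ⟨("review", 0), by simp, by (simp at h; simp [h])⟩
    · exact ⟨("literature", 0), by simp, by (simp at h; simp [h])⟩
    · exact ⟨("survey", 0), by simp, by (simp at h; simp [h])⟩
  · intro i hi
    simp [pvKeywordCategory, List.mem_filterMap] at hi
    rcases hi with ⟨-, rfl⟩|⟨-, rfl⟩|⟨-, rfl⟩|⟨-, rfl⟩|⟨-, rfl⟩|⟨-, rfl⟩|⟨-, rfl⟩|⟨-, rfl⟩|⟨-, rfl⟩|⟨-, rfl⟩|⟨-, rfl⟩|⟨-, rfl⟩|⟨-, rfl⟩|⟨-, rfl⟩|⟨-, rfl⟩|⟨-, rfl⟩ <;> norm_num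

set_option maxHeartbeats 800000 in
theorem alt_g2 (t : String)
    (f1 : PySem.Str.isIn "review" (PySem.Str.lower t) = false)
    (f2 : PySem.Str.isIn "literature" (PySem.Str.lower t) = false)
    (f3 : PySem.Str.isIn "survey" (PySem.Str.lower t) = false)
    (hg : (PySem.Str.isIn "analyze" (PySem.Str.lower t) ||
      (PySem.Str.isIn "analysis" (PySem.Str.lower t) ||
        PySem.Str.isIn "examine" (PySem.Str.lower t))) = true) :
    generate_faceted_questions_alt t =
      ["What are the main trends?", "What are the key metrics?",
       "What factors influence performance?", "What are the conclusions?"] := by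
  unfold generate_faceted_questions_alt
  dsimp only
  rw [best_eq _ 1 ?_ ?_]
  · simp [PySem.List.pyGet?, PySem.List.pyIdx?, pvQuestionsTable]
  · simp only [Bool.or_eq_true] at hg
    simp only [pvKeywordCategory, List.mem_filterMap]
    rcases hg with h | h | h
    · exact ⟨("analyze", 1), by simp, by (simp at h; simp [h])⟩
    · exact ⟨("analysis", 1), by simp, by (simp at h; simp [h])⟩
    · exact ⟨("examine", 1), by simp, by (simp at h; simp [h])⟩
  · intro i hi
    simp at f1 f2 f3
    simp [pvKeywordCategory, List.mem_filterMap, f1, f2, f3] at hi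
    rcases hi with ⟨-, rfl⟩|⟨-, rfl⟩|⟨-, rfl⟩|⟨-, rfl⟩|⟨-, rfl⟩|⟨-, rfl⟩|⟨-, rfl⟩|⟨-, rfl⟩|⟨-, rfl⟩|⟨-, rfl⟩|⟨-, rfl⟩|⟨-, rfl⟩|⟨-, rfl⟩ <;> norm_num

set_option maxHeartbeats 800000 in
theorem alt_g3 (t : String)
    (f1 : PySem.Str.isIn "review" (PySem.Str.lower t) = false)
    (f2 : PySem.Str.isIn "literature" (PySem.Str.lower t) = false)
    (f3 : PySem.Str.isIn "survey" (PySem.Str.lower t) = false)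
    (f4 : PySem.Str.isIn "analyze" (PySem.Str.lower t) = false)
    (f5 : PySem.Str.isIn "analysis" (PySem.Str.lower t) = false)
    (f6 : PySem.Str.isIn "examine" (PySem.Str.lower t) = false)
    (hg : (PySem.Str.isIn "compare" (PySem.Str.lower t) ||
      (PySem.Str.isIn "comparison" (PySem.Str.lower t) ||
        PySem.Str.isIn "contrast" (PySem.Str.lower t))) = true) :
    generate_faceted_questions_alt t =
      ["What are the main differences?", "What are the similarities?",
       "What are the advantages and disadvantages?", "What are the key characteristics?"] := by
  unfold generate_faceted_questions_alt
  dsimp only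
  rw [best_eq _ 2 ?_ ?_]
  · simp [PySem.List.pyGet?, PySem.List.pyIdx?, pvQuestionsTable]
  · simp only [Bool.or_eq_true] at hg
    simp only [pvKeywordCategory, List.mem_filterMap]
    rcases hg with h | h | h
    · exact ⟨("compare", 2), by simp, by (simp at h; simp [h])⟩
    · exact ⟨("comparison", 2), by simp, by (simp at h; simp [h])⟩
    · exact ⟨("contrast", 2), by simp, by (simp at h; simp [h])⟩
  · intro i hi
    simp at f1 f2 f3 f4 f5 f6
    simp [pvKeywordCategory, List.mem_filterMap, f1, f2, f3, f4, f5, f6] at hi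
    rcases hi with ⟨-, rfl⟩|⟨-, rfl⟩|⟨-, rfl⟩|⟨-, rfl⟩|⟨-, rfl⟩|⟨-, rfl⟩|⟨-, rfl⟩|⟨-, rfl⟩|⟨-, rfl⟩|⟨-, rfl⟩ <;> norm_num

set_option maxHeartbeats 800000 in
theorem alt_g4 (t : String)
    (f1 : PySem.Str.isIn "review" (PySem.Str.lower t) = false)
    (f2 : PySem.Str.isIn "literature" (PySem.Str.lower t) = false)
    (f3 : PySem.Str.isIn "survey" (PySem.Str.lower t) = false)
    (f4 : PySem.Str.isIn "analyze" (PySem.Str.lower t) = false)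
    (f5 : PySem.Str.isIn "analysis" (PySem.Str.lower t) = false)
    (f6 : PySem.Str.isIn "examine" (PySem.Str.lower t) = false)
    (f7 : PySem.Str.isIn "compare" (PySem.Str.lower t) = false)
    (f8 : PySem.Str.isIn "comparison" (PySem.Str.lower t) = false)
    (f9 : PySem.Str.isIn "contrast" (PySem.Str.lower t) = false)
    (hg : (PySem.Str.isIn "prepare" (PySem.Str.lower t) ||
      (PySem.Str.isIn "plan" (PySem.Str.lower t) ||
        (PySem.Str.isIn "create" (PySem.Str.lower t) ||
          PySem.Str.isIn "develop" (PySem.Str.lower t)))) = true) :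
    generate_faceted_questions_alt t =
      ["What are the essential components?", "What steps are required?",
       "What resources are needed?", "What are the best practices?"] := by
  unfold generate_faceted_questions_alt
  dsimp only
  rw [best_eq _ 3 ?_ ?_]
  · simp [PySem.List.pyGet?, PySem.List.pyIdx?, pvQuestionsTable]
  · simp only [Bool.or_eq_true] at hg
    simp only [pvKeywordCategory, List.mem_filterMap]
    rcases hg with h | h | h | h
    · exact ⟨("prepare", 3), by simp, by (simp at h; simp [h])⟩
    · exact ⟨("plan", 3), by simp, by (simp at h; simp [h])⟩
    · exact ⟨("create", 3), by simp, by (simp at h; simp [h])⟩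
    · exact ⟨("develop", 3), by simp, by (simp at h; simp [h])⟩
  · intro i hi
    simp at f1 f2 f3 f4 f5 f6 f7 f8 f9
    simp [pvKeywordCategory, List.mem_filterMap, f1, f2, f3, f4, f5, f6, f7, f8, f9] at hi
    rcases hi with ⟨-, rfl⟩|⟨-, rfl⟩|⟨-, rfl⟩|⟨-, rfl⟩|⟨-, rfl⟩|⟨-, rfl⟩|⟨-, rfl⟩ <;> norm_num

set_option maxHeartbeats 800000 in
theorem alt_g5 (t : String)
    (f1 : PySem.Str.isIn "review" (PySem.Str.lower t) = false)
    (f2 : PySem.Str.isIn "literature" (PySem.Str.lower t) = false)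
    (f3 : PySem.Str.isIn "survey" (PySem.Str.lower t) = false)
    (f4 : PySem.Str.isIn "analyze" (PySem.Str.lower t) = false)
    (f5 : PySem.Str.isIn "analysis" (PySem.Str.lower t) = false)
    (f6 : PySem.Str.isIn "examine" (PySem.Str.lower t) = false)
    (f7 : PySem.Str.isIn "compare" (PySem.Str.lower t) = false)
    (f8 : PySem.Str.isIn "comparison" (PySem.Str.lower t) = false)
    (f9 : PySem.Str.isIn "contrast" (PySem.Str.lower t) = false)
    (f10 : PySem.Str.isIn "prepare" (PySem.Str.lower t) = false)
    (f11 : PySem.Str.isIn "plan" (PySem.Str.lower t) = false)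
    (f12 : PySem.Str.isIn "create" (PySem.Str.lower t) = false)
    (f13 : PySem.Str.isIn "develop" (PySem.Str.lower t) = false)
    (hg : (PySem.Str.isIn "study" (PySem.Str.lower t) ||
      (PySem.Str.isIn "learn" (PySem.Str.lower t) ||
        PySem.Str.isIn "understand" (PySem.Str.lower t))) = true) :
    generate_faceted_questions_alt t =
      ["What are the key concepts?", "What are the main principles?",
       "What are the important details?", "What should be remembered?"] := by
  unfold generate_faceted_questions_alt
  dsimp only
  rw [best_eq _ 4 ?_ ?_]
  · simp [PySem.List.pyGet?, PySem.List.pyIdx?, pvQuestionsTable]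
  · simp only [Bool.or_eq_true] at hg
    simp only [pvKeywordCategory, List.mem_filterMap]
    rcases hg with h | h | h
    · exact ⟨("study", 4), by simp, by (simp at h; simp [h])⟩
    · exact ⟨("learn", 4), by simp, by (simp at h; simp [h])⟩
    · exact ⟨("understand", 4), by simp, by (simp at h; simp [h])⟩
  · intro i hi
    simp at f1 f2 f3 f4 f5 f6 f7 f8 f9 f10 f11 f12 f13
    simp [pvKeywordCategory, List.mem_filterMap, f1, f2, f3, f4, f5, f6, f7, f8, f9, f10, f11, f12, f13] at hi
    rcases hi with ⟨-, rfl⟩|⟨-, rfl⟩|⟨-, rfl⟩ <;> norm_num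

set_option maxHeartbeats 800000 in
theorem alt_g6 (t : String)
    (f1 : PySem.Str.isIn "review" (PySem.Str.lower t) = false)
    (f2 : PySem.Str.isIn "literature" (PySem.Str.lower t) = false)
    (f3 : PySem.Str.isIn "survey" (PySem.Str.lower t) = false)
    (f4 : PySem.Str.isIn "analyze" (PySem.Str.lower t) = false)
    (f5 : PySem.Str.isIn "analysis" (PySem.Str.lower t) = false)
    (f6 : PySem.Str.isIn "examine" (PySem.Str.lower t) = false)
    (f7 : PySem.Str.isIn "compare" (PySem.Str.lower t) = false)
    (f8 : PySem.Str.isIn "comparison" (PySem.Str.lower t) = false)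
    (f9 : PySem.Str.isIn "contrast" (PySem.Str.lower t) = false)
    (f10 : PySem.Str.isIn "prepare" (PySem.Str.lower t) = false)
    (f11 : PySem.Str.isIn "plan" (PySem.Str.lower t) = false)
    (f12 : PySem.Str.isIn "create" (PySem.Str.lower t) = false)
    (f13 : PySem.Str.isIn "develop" (PySem.Str.lower t) = false)
    (f14 : PySem.Str.isIn "study" (PySem.Str.lower t) = false)
    (f15 : PySem.Str.isIn "learn" (PySem.Str.lower t) = false)
    (f16 : PySem.Str.isIn "understand" (PySem.Str.lower t) = false) :
    generate_faceted_questions_alt t =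
      ["What are the main topics?", "What are the key points?",
       "What information is provided?", "What are the important details?"] := by
  unfold generate_faceted_questions_alt
  dsimp only
  have hnil : pvKeywordCategory.filterMap
      (fun p => if PySem.Str.isIn p.1 (PySem.Str.lower t) then some p.2 else none) = [] := by
    simp only [pvKeywordCategory, List.filterMap_cons, List.filterMap_nil, f1, f2, f3, f4,
      f5, f6, f7, f8, f9, f10, f11, f12, f13, f14, f15, f16, Bool.false_eq_true, if_false]
  rw [hnil]
  simp [PySem.List.min?, PySem.List.pyGet?, PySem.List.pyIdx?, pvQuestionsTable]

set_option maxHeartbeats 800000 in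
theorem gfq_eq (jtbd_text : String) :
    generate_faceted_questions jtbd_text = generate_faceted_questions_alt jtbd_text := by
  unfold generate_faceted_questions
  simp only [List.any_cons, List.any_nil, Bool.or_false]
  cases hg1 : (PySem.Str.isIn "review" (PySem.Str.lower jtbd_text) ||
      (PySem.Str.isIn "literature" (PySem.Str.lower jtbd_text) ||
        PySem.Str.isIn "survey" (PySem.Str.lower jtbd_text)))
  case true => rw [alt_g1 _ hg1]; simp [PySem.List.slice]
  case false =>
  obtain ⟨f1, f2, f3⟩ := Bool.or_eq_false_iff.mp hg1 |>.imp id Bool.or_eq_false_iff.mp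
  cases hg2 : (PySem.Str.isIn "analyze" (PySem.Str.lower jtbd_text) ||
      (PySem.Str.isIn "analysis" (PySem.Str.lower jtbd_text) ||
        PySem.Str.isIn "examine" (PySem.Str.lower jtbd_text)))
  case true => rw [alt_g2 _ f1 f2 f3 hg2]; simp [PySem.List.slice]
  case false =>
  obtain ⟨f4, f5, f6⟩ := Bool.or_eq_false_iff.mp hg2 |>.imp id Bool.or_eq_false_iff.mp
  cases hg3 : (PySem.Str.isIn "compare" (PySem.Str.lower jtbd_text) ||
      (PySem.Str.isIn "comparison" (PySem.Str.lower jtbd_text) ||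
        PySem.Str.isIn "contrast" (PySem.Str.lower jtbd_text)))
  case true => rw [alt_g3 _ f1 f2 f3 f4 f5 f6 hg3]; simp [PySem.List.slice]
  case false =>
  obtain ⟨f7, f8, f9⟩ := Bool.or_eq_false_iff.mp hg3 |>.imp id Bool.or_eq_false_iff.mp
  cases hg4 : (PySem.Str.isIn "prepare" (PySem.Str.lower jtbd_text) ||
      (PySem.Str.isIn "plan" (PySem.Str.lower jtbd_text) ||
        (PySem.Str.isIn "create" (PySem.Str.lower jtbd_text) ||
          PySem.Str.isIn "develop" (PySem.Str.lower jtbd_text))))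
  case true => rw [alt_g4 _ f1 f2 f3 f4 f5 f6 f7 f8 f9 hg4]; simp [PySem.List.slice]
  case false =>
  have h4 := Bool.or_eq_false_iff.mp hg4
  have h4' := Bool.or_eq_false_iff.mp h4.2
  have h4'' := Bool.or_eq_false_iff.mp h4'.2
  have f10 := h4.1; have f11 := h4'.1; have f12 := h4''.1; have f13 := h4''.2
  cases hg5 : (PySem.Str.isIn "study" (PySem.Str.lower jtbd_text) ||
      (PySem.Str.isIn "learn" (PySem.Str.lower jtbd_text) ||
        PySem.Str.isIn "understand" (PySem.Str.lower jtbd_text)))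
  case true => rw [alt_g5 _ f1 f2 f3 f4 f5 f6 f7 f8 f9 f10 f11 f12 f13 hg5]; simp [PySem.List.slice]
  case false =>
    obtain ⟨f14, f15, f16⟩ := Bool.or_eq_false_iff.mp hg5 |>.imp id Bool.or_eq_false_iff.mp
    rw [alt_g6 _ f1 f2 f3 f4 f5 f6 f7 f8 f9 f10 f11 f12 f13 f14 f15 f16]
    simp [PySem.List.slice]

-- ===== VERDICT (by name: the statement is the Claim_ definition above) =====
theorem generate_faceted_questions_spec : Claim_equal_generate_faceted_questions := by
  intro jtbd_text _
  unfold Spec_generate_faceted_questions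
  exact gfq_eq jtbd_text
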